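-- pv_equiv track=rewrite | github.com/billzorn/titanic | conv.py | simplify_exponent
-- ===== SOURCE A (Python) =====
-- def simplify_exponent(c, e):
--     assert isinstance(c, int) or c is None
--     assert isinstance(e, int) or e is None
--
--     if c is None:
--         return None, None
--     elif e is None:
--         if c > 0:
--             return 1, None
--         elif c == 0:
--             return 0, None
--         else: # c < 0
--             return -1, None
--     elif c == 0:
--         return 0, 0
--     else:
--         while c % 10 == 0:
--             c = c // 10
--             e = e + 1
--         return c, e
-- ===== SOURCE B (Python) =====
-- def simplify_exponent(c, e):
--     assert isinstance(c, int) or c is None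
--     assert isinstance(e, int) or e is None
--
--     if c is None:
--         return None, None
--     elif e is None:
--         if c > 0:
--             return 1, None
--         elif c == 0:
--             return 0, None
--         else: # c < 0
--             return -1, None
--     elif c == 0:
--         return 0, 0
--     else:
--         s = str(c)
--         k = len(s) - len(s.rstrip('0'))
--         return c // 10 ** k, e + k
-- ===== Notes on version B (the rewrite author's own statement) =====
-- stated objective: idiomatic
-- what changed: The digit-at-a-time division loop is replaced by counting the trailing decimal zeros of str(c) in one string scan and performing a single division by 10**k.
import Mathlib
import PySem

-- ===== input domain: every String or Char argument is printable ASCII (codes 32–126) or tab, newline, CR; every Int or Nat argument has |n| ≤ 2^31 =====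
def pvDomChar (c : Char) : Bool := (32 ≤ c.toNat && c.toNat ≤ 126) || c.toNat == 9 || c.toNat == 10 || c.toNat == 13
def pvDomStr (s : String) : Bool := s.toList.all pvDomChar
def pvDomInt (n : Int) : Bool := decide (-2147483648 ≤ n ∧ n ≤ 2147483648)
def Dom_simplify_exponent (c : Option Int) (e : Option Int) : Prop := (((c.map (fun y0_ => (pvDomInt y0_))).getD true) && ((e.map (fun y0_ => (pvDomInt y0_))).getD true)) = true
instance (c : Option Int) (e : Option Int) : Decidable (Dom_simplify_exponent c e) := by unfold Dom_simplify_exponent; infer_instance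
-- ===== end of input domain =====

-- B replaces A's digit-at-a-time division loop by counting the trailing '0'
-- characters of str(c) and doing a single division by 10^k (idiomatic; same cost).


-- ===== PORT A =====
-- termination of A's while-loop: dividing a nonzero multiple of 10 by 10 shrinks |c|
theorem pvStripLoop_dec (c : Int) (h0 : c ≠ 0) (hm : PySem.Int.mod c 10 = 0) :
    (PySem.Int.floordiv c 10).natAbs < c.natAbs := by
  obtain ⟨m, rfl⟩ := (PySem.Int.mod_eq_zero_iff_dvd c 10).mp hm
  rw [PySem.Int.floordiv_eq_ediv_of_pos (by norm_num), Int.mul_ediv_cancel_left _ (by norm_num)]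
  omega

-- A's 'while c % 10 == 0: c = c // 10; e = e + 1'; the c ≠ 0 conjunct only makes the
-- recursion total (it is invariant: the loop is entered with c ≠ 0 and keeps c ≠ 0)
def pvStripLoop (c : Int) (e : Int) : Int × Int :=
  if h : c ≠ 0 ∧ PySem.Int.mod c 10 = 0 then
    pvStripLoop (PySem.Int.floordiv c 10) (e + 1)
  else
    (c, e)
termination_by c.natAbs
decreasing_by exact pvStripLoop_dec c h.1 h.2

def simplify_exponent (c : Option Int) (e : Option Int) : Option Int × Option Int :=
  match c with
  | none => (none, none)
  | some cv =>
    match e with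
    | none =>
      if cv > 0 then (some 1, none)
      else if cv = 0 then (some 0, none)
      else (some (-1), none)
    | some ev =>
      if cv = 0 then (some 0, some 0)
      else
        let p := pvStripLoop cv ev
        (some p.1, some p.2)

-- ===== PORT B =====
-- exact port of str.rstrip('0') (PySem has no rstrip-with-argument primitive)
def pvRstrip0 (cs : List Char) : List Char := (cs.reverse.dropWhile (· == '0')).reverse

def simplify_exponent_alt (c : Option Int) (e : Option Int) : Option Int × Option Int :=
  match c with
  | none => (none, none)
  | some cv =>
    match e with
    | none =>
      if cv > 0 then (some 1, none)
      else if cv = 0 then (some 0, none)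
      else (some (-1), none)
    | some ev =>
      if cv = 0 then (some 0, some 0)
      else
        let s := PySem.Int.toChars cv          -- str(c)
        let k : Nat := s.length - (pvRstrip0 s).length
        (some (PySem.Int.floordiv cv ((10 : Int) ^ k)), some (ev + (k : Int)))

-- ===== PRECONDITION & SPEC =====
def Spec_simplify_exponent (c : Option Int) (e : Option Int) (out : Option Int × Option Int) : Prop := out = simplify_exponent_alt c e
instance (c : Option Int) (e : Option Int) (out : Option Int × Option Int) : Decidable (Spec_simplify_exponent c e out) := by unfold Spec_simplify_exponent; infer_instance

-- ===== CLAIM (what is proved, stated in full; the proofs are below) =====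
def Claim_equal_simplify_exponent : Prop := ∀ (c : Option Int) (e : Option Int), Dom_simplify_exponent c e → Spec_simplify_exponent c e (simplify_exponent c e)

-- ===== LEMMAS AND PROOFS =====

-- number of trailing '0' characters
def pvTrail (cs : List Char) : Nat := (cs.reverse.takeWhile (· == '0')).length

theorem pvRstrip0_len (cs : List Char) : cs.length - (pvRstrip0 cs).length = pvTrail cs := by
  have h := congrArg List.length (List.takeWhile_append_dropWhile (p := (· == '0')) (l := cs.reverse))
  simp only [List.length_append, List.length_reverse] at h
  simp only [pvRstrip0, pvTrail, List.length_reverse]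
  omega

theorem pvDigitChar_eq_zero_iff (m : Nat) (hm : m < 10) : ((Nat.digitChar m == '0') = true) ↔ m = 0 := by
  interval_cases m <;> simp [Nat.digitChar]

-- trailing-zero recurrence of decimal digit strings
theorem pvTrail_toDigits (n : Nat) (hn : 0 < n) :
    pvTrail (Nat.toDigits 10 n) =
      if n % 10 = 0 then pvTrail (Nat.toDigits 10 (n / 10)) + 1 else 0 := by
  by_cases h : n < 10
  · have hmod : n % 10 = n := Nat.mod_eq_of_lt h
    rw [Nat.toDigits_of_lt_base h]
    have hne : ¬ ((Nat.digitChar n == '0') = true) := by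
      intro hc; exact absurd ((pvDigitChar_eq_zero_iff n h).mp hc) (by omega)
    simp only [pvTrail, List.reverse_singleton, List.takeWhile_cons]
    rw [if_neg hne, if_neg (by omega)]
    rfl
  · have hle : 10 ≤ n := by omega
    rw [Nat.toDigits_of_base_le (by norm_num) hle]
    have hlt : n % 10 < 10 := Nat.mod_lt _ (by norm_num)
    simp only [pvTrail, List.reverse_append, List.reverse_singleton, List.singleton_append,
      List.takeWhile_cons]
    by_cases hz : n % 10 = 0
    · rw [if_pos hz, if_pos (by rw [hz]; rfl)]
      rfl
    · rw [if_neg hz, if_neg (by rw [pvDigitChar_eq_zero_iff _ hlt]; exact hz)]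
      rfl

-- trailing zeros of str(c): the possible leading '-' is irrelevant
theorem pvTrail_toChars (cv : Int) (_h : cv ≠ 0) :
    pvTrail (PySem.Int.toChars cv) = pvTrail (Nat.toDigits 10 cv.natAbs) := by
  unfold PySem.Int.toChars
  by_cases hneg : cv < 0
  · rw [if_pos hneg]
    simp only [pvTrail, List.reverse_cons, List.takeWhile_append]
    split_ifs with hall
    · have hself : List.takeWhile (· == '0') (Nat.toDigits 10 cv.natAbs).reverse
          = (Nat.toDigits 10 cv.natAbs).reverse :=
        List.IsPrefix.eq_of_length (List.takeWhile_prefix _) hall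
      simp [hself]
    · rfl
  · rw [if_neg hneg]
    have : cv.toNat = cv.natAbs := by omega
    rw [this]

def pvK (cv : Int) : Nat := pvTrail (Nat.toDigits 10 cv.natAbs)

theorem pvStripLoop_eq (n : Nat) : ∀ (cv ev : Int), cv.natAbs = n → cv ≠ 0 →
    pvStripLoop cv ev = (PySem.Int.floordiv cv ((10 : Int) ^ pvK cv), ev + (pvK cv : Int)) := by
  induction n using Nat.strong_induction_on with
  | _ n ih =>
    intro cv ev hn h0
    rw [pvStripLoop]
    by_cases hm : PySem.Int.mod cv 10 = 0
    · rw [dif_pos ⟨h0, hm⟩]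
      obtain ⟨m, rfl⟩ := (PySem.Int.mod_eq_zero_iff_dvd cv 10).mp hm
      have hm0 : m ≠ 0 := by rintro rfl; simp at h0
      have hdiv : PySem.Int.floordiv (10 * m) 10 = m := by
        rw [PySem.Int.floordiv_eq_ediv_of_pos (by norm_num),
          Int.mul_ediv_cancel_left _ (by norm_num)]
      have hlt : m.natAbs < n := by omega
      rw [hdiv, ih m.natAbs hlt m (ev + 1) rfl hm0]
      have hK : pvK (10 * m) = pvK m + 1 := by
        unfold pvK
        have hpos : 0 < (10 * m).natAbs := by omega
        rw [pvTrail_toDigits _ hpos]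
        have habs : (10 * m).natAbs = 10 * m.natAbs := by omega
        rw [if_pos (by omega), habs, Nat.mul_div_cancel_left _ (by norm_num)]
      have h1 : PySem.Int.floordiv (10 * m) ((10 : Int) ^ (pvK m + 1))
          = PySem.Int.floordiv m ((10 : Int) ^ pvK m) := by
        rw [PySem.Int.floordiv_eq_ediv_of_pos (by positivity),
          PySem.Int.floordiv_eq_ediv_of_pos (by positivity),
          pow_succ, mul_comm ((10:Int) ^ pvK m) 10,
          Int.mul_ediv_mul_of_pos m ((10:Int) ^ pvK m) (by norm_num : (0:Int) < 10)]
      rw [hK, h1]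
      simp only [Prod.mk.injEq]
      exact ⟨trivial, by push_cast; ring⟩
    · rw [dif_neg (by tauto)]
      have hK : pvK cv = 0 := by
        unfold pvK
        have hpos : 0 < cv.natAbs := by omega
        rw [pvTrail_toDigits _ hpos, if_neg]
        intro hz
        apply hm
        rw [PySem.Int.mod_eq_zero_iff_dvd]
        have : (10 : Nat) ∣ cv.natAbs := by omega
        exact Int.natAbs_dvd_natAbs.mp (by simpa using this)
      rw [hK]
      simp

-- ===== VERDICT (by name: the statement is the Claim_ definition above) =====
theorem simplify_exponent_spec : Claim_equal_simplify_exponent := by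
  intro c e _
  unfold Spec_simplify_exponent
  match c with
  | none => rfl
  | some cv =>
    match e with
    | none => rfl
    | some ev =>
      by_cases h0 : cv = 0
      · simp [simplify_exponent, simplify_exponent_alt, h0]
      · simp only [simplify_exponent, simplify_exponent_alt, if_neg h0]
        rw [pvStripLoop_eq cv.natAbs cv ev rfl h0]
        rw [pvRstrip0_len, pvTrail_toChars cv h0]
        rfl
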